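-- pv_equiv track=rewrite | github.com/salads-source/aocd_2022 | day3.py | find_total
-- ===== SOURCE A (Python) =====
-- import string
--
-- def parse(puzzle_input):
--     ref = puzzle_input.split('\n')
--     return ref
--
-- def find_total(input):
--     total, inp = 0, parse(input)
--     for i in inp:
--         mid = len(i) // 2
--         L = i[:mid]
--         R = i[mid:]
--         for v, c in enumerate(string.ascii_letters):
--             if c in L and c in R:
--                 total += v + 1
--     return total
-- ===== SOURCE B (Python) =====
-- import string
--
-- def find_total(input):
--     total = 0
--     for line in input.split('\n'):
--         mid = len(line) // 2
--         common = set(line[:mid]) & set(line[mid:])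
--         total += sum(string.ascii_letters.find(c) + 1 for c in common)
--     return total
-- ===== Notes on version B (the rewrite author's own statement) =====
-- stated objective: idiomatic
-- what changed: Instead of scanning all 52 ascii_letters per line with substring tests, B intersects the character sets of the two halves and sums priorities computed by ascii_letters.find(c)+1 (0 for non-letters), iterating only over the shared characters.
import Mathlib
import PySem

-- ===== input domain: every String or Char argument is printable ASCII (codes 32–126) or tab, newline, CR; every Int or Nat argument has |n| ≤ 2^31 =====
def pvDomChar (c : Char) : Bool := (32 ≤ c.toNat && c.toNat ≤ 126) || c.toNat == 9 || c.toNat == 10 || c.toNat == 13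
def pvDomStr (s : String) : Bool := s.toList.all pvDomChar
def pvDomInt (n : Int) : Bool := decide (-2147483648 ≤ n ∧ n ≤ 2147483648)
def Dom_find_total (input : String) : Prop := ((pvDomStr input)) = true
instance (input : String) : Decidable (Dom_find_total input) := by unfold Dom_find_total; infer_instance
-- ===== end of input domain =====

-- B replaces A's per-line scan over all 52 letters by a set intersection of the two
-- halves, summing priorities (ascii_letters.find(c)+1, which is 0 for non-letters)
-- only over the characters actually shared (objective: idiomatic; not timed faster).

-- string.ascii_letters
def pvLetters : List Char := "abcdefghijklmnopqrstuvwxyzABCDEFGHIJKLMNOPQRSTUVWXYZ".toList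

-- ===== PORT A =====
def find_total (input : String) : Int :=
  let inp := PySem.Chars.splitOn input.toList ['\n']
  inp.foldl
    (fun total i =>
      let mid := PySem.Int.floordiv (i.length : Int) 2
      let L := PySem.List.slice i none (some mid)
      let R := PySem.List.slice i (some mid) none
      (PySem.List.enumerate pvLetters 0).foldl
        (fun t vc =>
          if PySem.Chars.isIn [vc.2] L && PySem.Chars.isIn [vc.2] R then t + (vc.1 + 1)
          else t)
        total)
    0

-- ===== PORT B =====
def find_total_alt (input : String) : Int :=
  let lines := PySem.Chars.splitOn input.toList ['\n']
  lines.foldl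
    (fun total line =>
      let mid := PySem.Int.floordiv (line.length : Int) 2
      let common := PySem.Set.inter
        (PySem.Set.ofList (PySem.List.slice line none (some mid)))
        (PySem.Set.ofList (PySem.List.slice line (some mid) none))
      total + (common.map (fun c => PySem.Chars.find pvLetters [c] + 1)).sum)
    0

-- ===== PRECONDITION & SPEC =====
def Spec_find_total (input : String) (out : Int) : Prop := out = find_total_alt input
instance (input : String) (out : Int) : Decidable (Spec_find_total input out) := by unfold Spec_find_total; infer_instance

-- ===== CLAIM (what is proved, stated in full; the proofs are below) =====
def Claim_equal_find_total : Prop := ∀ (input : String), Dom_find_total input → Spec_find_total input (find_total input)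

-- ===== LEMMAS AND PROOFS =====

theorem pv_isIn_single (c : Char) (l : List Char) :
    PySem.Chars.isIn [c] l = decide (c ∈ l) := by
  by_cases h : c ∈ l
  · have := PySem.Chars.isIn_iff_infix [c] l
    simp [h, this.2 ((List.singleton_infix_iff c l).2 h)]
  · have := PySem.Chars.isIn_eq_false_iff [c] l
    simp [h, this.2 (fun hc => h ((List.singleton_infix_iff c l).1 hc))]

theorem pv_idx (vc : Int × Char) (h : vc ∈ PySem.List.enumerate pvLetters 0) :
    vc.1 + 1 = PySem.Chars.find pvLetters [vc.2] + 1 := by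
  revert vc h; decide

theorem pv_pri_zero (c : Char) (h : c ∉ pvLetters) :
    PySem.Chars.find pvLetters [c] + 1 = 0 := by
  have := (PySem.Chars.find_eq_neg_one_iff pvLetters [c]).2
    (fun hc => h ((List.singleton_infix_iff c pvLetters).1 hc))
  omega

theorem pv_line (L R : List Char) (t : Int) :
    (PySem.List.enumerate pvLetters 0).foldl
      (fun t vc =>
        if PySem.Chars.isIn [vc.2] L && PySem.Chars.isIn [vc.2] R then t + (vc.1 + 1)
        else t) t
    = t + ((PySem.Set.inter (PySem.Set.ofList L) (PySem.Set.ofList R)).map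
        (fun c => PySem.Chars.find pvLetters [c] + 1)).sum := by
  have hf : (fun (t : Int) (vc : Int × Char) =>
        if PySem.Chars.isIn [vc.2] L && PySem.Chars.isIn [vc.2] R then t + (vc.1 + 1)
        else t)
      = fun t vc => t + (if vc.2 ∈ L ∧ vc.2 ∈ R then vc.1 + 1 else 0) := by
    funext t vc
    simp only [pv_isIn_single]
    by_cases hL : vc.2 ∈ L <;> by_cases hR : vc.2 ∈ R <;> simp [hL, hR]
  rw [hf, PySem.List.foldl_add]
  congr 1
  -- replace the index by find, then drop enumerate
  have h1 : (PySem.List.enumerate pvLetters 0).map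
        (fun vc => if vc.2 ∈ L ∧ vc.2 ∈ R then vc.1 + 1 else 0)
      = (PySem.List.enumerate pvLetters 0).map
        (fun vc => if vc.2 ∈ L ∧ vc.2 ∈ R then PySem.Chars.find pvLetters [vc.2] + 1 else 0) := by
    refine List.map_congr_left (fun vc hvc => ?_)
    by_cases h : vc.2 ∈ L ∧ vc.2 ∈ R
    · simp [h, pv_idx vc hvc]
    · simp [h]
  rw [h1]
  have h2 : (PySem.List.enumerate pvLetters 0).map
        (fun vc => if vc.2 ∈ L ∧ vc.2 ∈ R then PySem.Chars.find pvLetters [vc.2] + 1 else 0)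
      = pvLetters.map
        (fun c => if c ∈ L ∧ c ∈ R then PySem.Chars.find pvLetters [c] + 1 else 0) := by
    conv_rhs => rw [← PySem.List.map_snd_enumerate pvLetters 0]
    rw [List.map_map]
    rfl
  rw [h2]
  -- both sides as Finset sums over Char
  have hA : (pvLetters.map
        (fun c => if c ∈ L ∧ c ∈ R then PySem.Chars.find pvLetters [c] + 1 else 0)).sum
      = ∑ c ∈ pvLetters.toFinset,
          (if c ∈ L ∧ c ∈ R then PySem.Chars.find pvLetters [c] + 1 else 0) := by
    rw [List.sum_toFinset _ (by decide : pvLetters.Nodup)]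
  have hinter : PySem.Set.inter (PySem.Set.ofList L) (PySem.Set.ofList R)
      = (PySem.Set.ofList L).filter (fun x => (PySem.Set.ofList R).contains x) := by
    simp [PySem.Set.inter, PySem.Set.contains]
  have hnodup : ((PySem.Set.ofList L).filter
      (fun x => (PySem.Set.ofList R).contains x)).Nodup :=
    (PySem.Set.nodup_ofList L).filter _
  have hB : (((PySem.Set.ofList L).filter (fun x => (PySem.Set.ofList R).contains x)).map
        (fun c => PySem.Chars.find pvLetters [c] + 1)).sum
      = ∑ c ∈ ((PySem.Set.ofList L).filter (fun x => (PySem.Set.ofList R).contains x)).toFinset,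
          (PySem.Chars.find pvLetters [c] + 1) := by
    rw [List.sum_toFinset _ hnodup]
  rw [hinter, hB, hA]
  -- identify the B-side index set
  have hset : ((PySem.Set.ofList L).filter (fun x => (PySem.Set.ofList R).contains x)).toFinset
      = L.toFinset.filter (fun c => c ∈ R) := by
    ext c
    simp [PySem.Set.mem_ofList]
  rw [hset]
  -- A-side: move the condition into a filter
  rw [← Finset.sum_filter (fun c => c ∈ L ∧ c ∈ R)
      (fun c => PySem.Chars.find pvLetters [c] + 1)]
  refine Finset.sum_subset ?_ ?_
  · intro c hc
    simp only [Finset.mem_filter, List.mem_toFinset] at hc ⊢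
    exact ⟨hc.2.1, hc.2.2⟩
  · intro c hc hcn
    simp only [Finset.mem_filter, List.mem_toFinset] at hc hcn
    have hcl : c ∉ pvLetters := fun hl => hcn ⟨hl, hc.1, hc.2⟩
    exact pv_pri_zero c hcl

theorem pv_outer (ls : List (List Char)) (t : Int) :
    ls.foldl
      (fun total i =>
        let mid := PySem.Int.floordiv (i.length : Int) 2
        let L := PySem.List.slice i none (some mid)
        let R := PySem.List.slice i (some mid) none
        (PySem.List.enumerate pvLetters 0).foldl
          (fun t vc =>
            if PySem.Chars.isIn [vc.2] L && PySem.Chars.isIn [vc.2] R then t + (vc.1 + 1)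
            else t)
          total) t
    = ls.foldl
      (fun total line =>
        let mid := PySem.Int.floordiv (line.length : Int) 2
        let common := PySem.Set.inter
          (PySem.Set.ofList (PySem.List.slice line none (some mid)))
          (PySem.Set.ofList (PySem.List.slice line (some mid) none))
        total + (common.map (fun c => PySem.Chars.find pvLetters [c] + 1)).sum) t := by
  induction ls generalizing t with
  | nil => rfl
  | cons l ls ih =>
    simp only [List.foldl_cons]
    rw [pv_line]
    exact ih _

-- ===== VERDICT (by name: the statement is the Claim_ definition above) =====
theorem find_total_spec : Claim_equal_find_total := by
  intro input _
  show find_total input = find_total_alt input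
  unfold find_total find_total_alt
  exact pv_outer _ 0
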